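-- pv_equiv track=rewrite | github.com/ChrisKolios/CPS109_Fall2022 | Lab2/Quizzes/Quiz_Tuesday_10am_SampleSoln.py | Tu10_SSBF
-- ===== SOURCE A (Python) =====
-- def Tu10_SSBF(my_list):
--     full_operation = 0
--     numbers_seen_before = []
--     for i in range(len(my_list)):
--         if my_list[i] not in numbers_seen_before:
--             numbers_seen_before.append(my_list[i])
--             if (i % 2 == 0): # Even
--                 full_operation += my_list[i]
--             else:
--                 full_operation -= my_list[i]
--         else:
--             return full_operation
--     return full_operation
-- ===== SOURCE B (Python) =====
-- def Tu10_SSBF(my_list):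
--     # Pass 1: collect the duplicate-free prefix (stop before the first repeat).
--     prefix = []
--     for x in my_list:
--         if x in prefix:
--             break
--         prefix.append(x)
--     # Pass 2: alternating sum by pairwise recursion over the prefix.
--     return _altsum(prefix)
--
-- def _altsum(lst):
--     if not lst:
--         return 0
--     if len(lst) == 1:
--         return lst[0]
--     return lst[0] - lst[1] + _altsum(lst[2:])
-- ===== Notes on version B (the rewrite author's own statement) =====
-- stated objective: alternative
-- what changed: A's single indexed loop with parity test and early return is replaced by two phases: build the duplicate-free prefix, then compute its alternating sum by a two-at-a-time recursion.
import Mathlib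
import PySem

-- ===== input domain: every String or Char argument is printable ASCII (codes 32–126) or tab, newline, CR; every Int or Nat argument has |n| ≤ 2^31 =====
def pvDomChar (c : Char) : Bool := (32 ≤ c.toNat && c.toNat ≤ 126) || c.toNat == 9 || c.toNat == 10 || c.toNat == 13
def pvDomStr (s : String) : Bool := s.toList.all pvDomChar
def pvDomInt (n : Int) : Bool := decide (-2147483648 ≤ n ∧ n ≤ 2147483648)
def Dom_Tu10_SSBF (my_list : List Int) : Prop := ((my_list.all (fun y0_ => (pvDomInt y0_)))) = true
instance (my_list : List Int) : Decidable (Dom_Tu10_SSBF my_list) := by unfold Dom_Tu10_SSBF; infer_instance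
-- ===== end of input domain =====

-- B replaces A's indexed loop (parity test + early return) by prefix extraction followed by a pairwise alternating-sum recursion; alternative decomposition, same cost.

-- ===== PORT A =====
-- the for-i-in-range loop with its early return, carrying (full_operation, numbers_seen_before)
def aLoopTu10 (l : List Int) (i : Nat) (acc : Int) (seen : List Int) : Int :=
  if h : i < l.length then
    if l[i] ∉ seen then
      aLoopTu10 l (i + 1)
        (if i % 2 = 0 then acc + l[i] else acc - l[i])
        (seen ++ [l[i]])
    else acc
  else acc
termination_by l.length - i

def Tu10_SSBF (my_list : List Int) : Int :=
  aLoopTu10 my_list 0 0 []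

-- ===== PORT B =====
-- pass 1 of Source B: the duplicate-free prefix (break at the first repeat)
def bPrefixTu10 (xs : List Int) (pre : List Int) : List Int :=
  match xs with
  | [] => pre
  | x :: rest => if x ∈ pre then pre else bPrefixTu10 rest (pre ++ [x])

-- pass 2 of Source B: _altsum, two elements at a time
def bAltsumTu10 : List Int → Int
  | [] => 0
  | [a] => a
  | a :: b :: rest => a - b + bAltsumTu10 rest

def Tu10_SSBF_alt (my_list : List Int) : Int :=
  bAltsumTu10 (bPrefixTu10 my_list [])

-- ===== PRECONDITION & SPEC =====
def Spec_Tu10_SSBF (my_list : List Int) (out : Int) : Prop := out = Tu10_SSBF_alt my_list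
instance (my_list : List Int) (out : Int) : Decidable (Spec_Tu10_SSBF my_list out) := by unfold Spec_Tu10_SSBF; infer_instance

-- ===== CLAIM (what is proved, stated in full; the proofs are below) =====
def Claim_equal_Tu10_SSBF : Prop := ∀ (my_list : List Int), Dom_Tu10_SSBF my_list → Spec_Tu10_SSBF my_list (Tu10_SSBF my_list)

-- ===== LEMMAS AND PROOFS =====

-- the duplicate-free prefix of xs relative to already-seen elements
def pvP (xs seen : List Int) : List Int :=
  match xs with
  | [] => []
  | x :: rest => if x ∈ seen then [] else x :: pvP rest (seen ++ [x])

-- alternating sum with an explicit leading sign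
def pvAltS (s : Int) : List Int → Int
  | [] => 0
  | x :: rest => s * x + pvAltS (-s) rest

lemma bPrefix_eq_P (xs : List Int) : ∀ pre, bPrefixTu10 xs pre = pre ++ pvP xs pre := by
  induction xs with
  | nil => intro pre; simp [bPrefixTu10, pvP]
  | cons x rest ih =>
    intro pre
    by_cases hx : x ∈ pre <;> simp [bPrefixTu10, pvP, hx, ih]

lemma bAltsum_eq_altS (l : List Int) : bAltsumTu10 l = pvAltS 1 l := by
  fun_induction bAltsumTu10 l with
  | case1 => simp [pvAltS]
  | case2 a => simp [pvAltS]
  | case3 a b rest ih => simp [pvAltS, ih]; ring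

lemma aLoop_drop (l : List Int) : ∀ i acc seen,
    aLoopTu10 l i acc seen =
      acc + pvAltS (if i % 2 = 0 then 1 else -1) (pvP (l.drop i) seen) := by
  intro i
  induction hn : l.length - i using Nat.strong_induction_on generalizing i with
  | _ n ih =>
    intro acc seen
    rw [aLoopTu10]
    by_cases h : i < l.length
    · have hdrop : l.drop i = l[i] :: l.drop (i + 1) :=
        List.drop_eq_getElem_cons h
      simp only [h, dif_pos]
      by_cases hm : l[i] ∈ seen
      · have hP : pvP (l.drop i) seen = [] := by
          rw [hdrop]; simp only [pvP, if_pos hm]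
        simp [hm, hP, pvAltS]
      · have hrec := ih (l.length - (i+1)) (by omega) (i+1) rfl
          (if i % 2 = 0 then acc + l[i] else acc - l[i]) (seen ++ [l[i]])
        simp only [hm, not_false_iff, if_true]
        rw [hrec, hdrop]
        have hpar : ((i+1) % 2 = 0) ↔ ¬ (i % 2 = 0) := by omega
        by_cases he : i % 2 = 0 <;>
          simp [pvP, pvAltS, hm, he, hpar] <;> ring
    · have : l.drop i = [] := List.drop_eq_nil_of_le (by omega)
      simp [h, this, pvP, pvAltS]

-- ===== VERDICT (by name: the statement is the Claim_ definition above) =====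
theorem Tu10_SSBF_spec : Claim_equal_Tu10_SSBF := by
  intro l _
  show Tu10_SSBF l = Tu10_SSBF_alt l
  rw [Tu10_SSBF, Tu10_SSBF_alt, aLoop_drop, bPrefix_eq_P, bAltsum_eq_altS]
  simp
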